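-- pv_equiv track=rewrite | github.com/PKUFlyingPig/CS61A | exams/61a-su20-practice-mt-solution/q1/q1.py | same_digits
-- ===== SOURCE A (Python) =====
-- def same_digits(a, b):
--     """
--     Implement same_digits, which takes two positive integers. It returns whether they both become
--     the same number after replacing each sequence of a digit repeated consecutively with only one of that
--     digit. For example, in 12222321, the sequence 2222 would be replaced by only 2, leaving 12321.
--     Restriction: You may only write combinations of the following in the blanks:
--     a, b, end, 10, %, if, while, and, or, ==, !=, True, False, and return. (No division allowed!)
--
--     >>> same_digits(2002200, 2202000) # Ignoring repeats, both are 2020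
--     True
--     >>> same_digits(21, 12) # Digits must appear in the same order
--     False
--     >>> same_digits(12, 2212) # 12 and 212 are not the same
--     False
--     >>> same_digits(2020, 20) # 2020 and 20 are not the same
--     False
--     """
--     assert a > 0 and b > 0
--     while a and b:
--         if  a % 10 == b % 10:
--             end = a % 10
--             while a % 10 == end:
--                 a = a // 10
--             while b % 10 == end:
--                 b = b // 10
--         else:
--             return False
--     return a == b
-- ===== SOURCE B (Python) =====
-- def same_digits(a, b):
--     assert a > 0 and b > 0
--     def collapse(n):
--         out = []
--         for ch in str(n):
--             if not out or out[-1] != ch: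
--                 out.append(ch)
--         return out
--     return collapse(a) == collapse(b)
-- ===== Notes on version B (the rewrite author's own statement) =====
-- stated objective: simpler
-- what changed: Replaces A's arithmetic right-to-left peel (nested while loops over %10 and //10 comparing both numbers in lockstep) by converting each number to its decimal string independently, collapsing consecutive repeated characters in one left-to-right pass, and comparing the two collapsed strings.
import Mathlib
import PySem

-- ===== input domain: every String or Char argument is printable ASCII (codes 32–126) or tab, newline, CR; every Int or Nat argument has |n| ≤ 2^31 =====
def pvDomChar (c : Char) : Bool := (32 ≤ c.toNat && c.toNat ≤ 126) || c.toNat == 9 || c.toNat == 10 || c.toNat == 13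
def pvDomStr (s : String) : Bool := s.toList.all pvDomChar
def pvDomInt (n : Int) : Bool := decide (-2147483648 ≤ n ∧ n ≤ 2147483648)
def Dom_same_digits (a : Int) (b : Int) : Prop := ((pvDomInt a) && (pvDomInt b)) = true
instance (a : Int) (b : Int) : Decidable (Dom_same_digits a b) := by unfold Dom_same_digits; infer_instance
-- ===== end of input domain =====

-- B replaces A's arithmetic right-to-left digit peel by string conversion plus a single
-- left-to-right collapse of consecutive repeated characters (objective: simpler).
-- Both programs raise AssertionError unless a > 0 and b > 0; Pre_ excludes exactly those inputs.

-- ===== PORT A =====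

-- inner 'while a % 10 == end: a = a // 10'; the '0 < a' conjunct only makes the
-- definition total (Python never reaches this loop with a = 0 under the assert)
def pvStripA (e a : Int) : Int :=
  if h : 0 < a ∧ PySem.Int.mod a 10 = e then pvStripA e (PySem.Int.floordiv a 10) else a
termination_by a.toNat
decreasing_by
  rw [PySem.Int.floordiv_eq_ediv_of_pos (by norm_num : (0:ℤ) < 10)]
  omega

lemma pvStripA_bounds (e a : Int) (h : 0 ≤ a) : 0 ≤ pvStripA e a ∧ pvStripA e a ≤ a := by
  rw [pvStripA]
  split_ifs with hc
  · have hd := PySem.Int.floordiv_eq_ediv_of_pos (by norm_num : (0:ℤ) < 10) (a := a)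
    have := pvStripA_bounds e (PySem.Int.floordiv a 10) (by rw [hd]; omega)
    rw [hd] at this ⊢
    omega
  · exact ⟨h, le_refl a⟩
termination_by a.toNat
decreasing_by
  rw [PySem.Int.floordiv_eq_ediv_of_pos (by norm_num : (0:ℤ) < 10)]
  omega

lemma pvStripA_lt (a : Int) (h : 0 < a) : pvStripA (PySem.Int.mod a 10) a < a := by
  rw [pvStripA, dif_pos ⟨h, rfl⟩,
    PySem.Int.floordiv_eq_ediv_of_pos (by norm_num : (0:ℤ) < 10)]
  have := pvStripA_bounds (PySem.Int.mod a 10) (a / 10) (by omega)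
  omega

-- outer 'while a and b'; '0 < a ∧ 0 < b' equals Python's 'a != 0 and b != 0' on the
-- nonnegative states the loop ever sees (it is a totality guard, not an algorithm switch)
def pvLoopA (a b : Int) : Bool :=
  if h : 0 < a ∧ 0 < b then
    if h2 : PySem.Int.mod a 10 = PySem.Int.mod b 10 then
      pvLoopA (pvStripA (PySem.Int.mod a 10) a) (pvStripA (PySem.Int.mod a 10) b)
    else false
  else a == b
termination_by a.toNat + b.toNat
decreasing_by
  have h1 := pvStripA_lt a h.1
  have h2' := pvStripA_lt b h.2
  rw [← h2] at h2'
  have n1 := (pvStripA_bounds (PySem.Int.mod a 10) a (le_of_lt h.1)).1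
  have n2 := (pvStripA_bounds (PySem.Int.mod a 10) b (le_of_lt h.2)).1
  omega

def same_digits (a : Int) (b : Int) : Bool := pvLoopA a b

-- ===== PORT B =====

-- collapse(n): fold over str(n), appending a char only when it differs from the last kept one
def pvCollapseB (n : Int) : List Char :=
  (PySem.Int.toStr n).toList.foldl
    (fun out ch => if out.getLast? ≠ some ch then out ++ [ch] else out) []

def same_digits_alt (a : Int) (b : Int) : Bool := pvCollapseB a == pvCollapseB b

-- ===== PRECONDITION & SPEC =====
-- A's 'assert a > 0 and b > 0' raises AssertionError otherwise; Pre_ excludes exactly those inputs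
def Pre_same_digits (a : Int) (b : Int) : Prop := 0 < a ∧ 0 < b
instance (a : Int) (b : Int) : Decidable (Pre_same_digits a b) := by unfold Pre_same_digits; infer_instance
def pvWitness_same_digits : Int × Int := (2002200, 2202000)

def Spec_same_digits (a : Int) (b : Int) (out : Bool) : Prop := out = same_digits_alt a b
instance (a : Int) (b : Int) (out : Bool) : Decidable (Spec_same_digits a b out) := by unfold Spec_same_digits; infer_instance

-- ===== CLAIM (what is proved, stated in full; the proofs are below) =====
def Claim_equal_same_digits : Prop := ∀ (a : Int) (b : Int), Dom_same_digits a b → Pre_same_digits a b → Spec_same_digits a b (same_digits a b)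

-- ===== LEMMAS AND PROOFS =====

-- Nat mirror of A's inner strip loop
lemma pvMod10 (n : Nat) : PySem.Int.mod (n : Int) 10 = ((n % 10 : Nat) : Int) := by
  exact_mod_cast PySem.Int.mod_natCast n 10

lemma pvDiv10 (n : Nat) : PySem.Int.floordiv (n : Int) 10 = ((n / 10 : Nat) : Int) := by
  exact_mod_cast PySem.Int.floordiv_natCast n 10

def pvStripN (d n : Nat) : Nat :=
  if 0 < n ∧ n % 10 = d then pvStripN d (n / 10) else n
termination_by n
decreasing_by omega

lemma pvStripN_le (d n : Nat) : pvStripN d n ≤ n := by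
  rw [pvStripN]
  split_ifs with hc
  · have := pvStripN_le d (n / 10); omega
  · exact le_refl n
termination_by n
decreasing_by omega

lemma pvStripN_lt (n : Nat) (h : 0 < n) : pvStripN (n % 10) n < n := by
  rw [pvStripN, if_pos ⟨h, rfl⟩]
  have := pvStripN_le (n % 10) (n / 10)
  omega

-- Nat mirror of A's outer loop, producing the collapsed LSB-first digit list
def pvCanonN (n : Nat) : List Nat :=
  if h : 0 < n then (n % 10) :: pvCanonN (pvStripN (n % 10) n) else []
termination_by n
decreasing_by exact pvStripN_lt n h

-- collapse of consecutive duplicates, front recursion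
def pvDD : List Nat → List Nat
  | [] => []
  | x :: t => if t.head? = some x then pvDD t else x :: pvDD t

-- B's fold, rephrased with the last kept element as explicit state
def pvScan (last : Option Char) : List Char → List Char
  | [] => []
  | c :: t => if last = some c then pvScan last t else c :: pvScan (some c) t

lemma pvStripA_cast (d n : Nat) : pvStripA (d : Int) (n : Int) = ((pvStripN d n : Nat) : Int) := by
  rw [pvStripA, pvStripN]
  by_cases hc : 0 < n ∧ n % 10 = d
  · rw [dif_pos (by rw [pvMod10]; omega),
      if_pos hc, pvDiv10]
    exact pvStripA_cast d (n / 10)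
  · rw [dif_neg (by rw [pvMod10]; omega), if_neg hc]
termination_by n
decreasing_by omega

lemma pvCanonN_pos (n : Nat) (h : 0 < n) :
    pvCanonN n = (n % 10) :: pvCanonN (pvStripN (n % 10) n) := by
  rw [pvCanonN, dif_pos h]

lemma pvCanonN_zero : pvCanonN 0 = [] := by rw [pvCanonN]; simp

lemma pvLoopA_eq (a b : Int) (ha : 0 ≤ a) (hb : 0 ≤ b) :
    pvLoopA a b = decide (pvCanonN a.toNat = pvCanonN b.toNat) := by
  rw [pvLoopA]
  obtain ⟨na, rfl⟩ : ∃ n : Nat, a = (n : Int) := ⟨a.toNat, by omega⟩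
  obtain ⟨nb, rfl⟩ : ∃ n : Nat, b = (n : Int) := ⟨b.toNat, by omega⟩
  simp only [Int.toNat_natCast]
  by_cases h : 0 < (na : Int) ∧ 0 < (nb : Int)
  · rw [dif_pos h]
    have hna : 0 < na := by exact_mod_cast h.1
    have hnb : 0 < nb := by exact_mod_cast h.2
    by_cases h2 : PySem.Int.mod (na : Int) 10 = PySem.Int.mod (nb : Int) 10
    · have hmod : na % 10 = nb % 10 := by
        rw [pvMod10, pvMod10] at h2; exact_mod_cast h2
      rw [dif_pos h2,
        pvLoopA_eq _ _ (pvStripA_bounds _ _ (le_of_lt h.1)).1 (pvStripA_bounds _ _ (le_of_lt h.2)).1]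
      simp only [pvMod10, pvStripA_cast, Int.toNat_natCast, decide_eq_decide]
      rw [pvCanonN_pos na hna, pvCanonN_pos nb hnb]
      simp [hmod]
    · rw [dif_neg h2]
      have hmod : na % 10 ≠ nb % 10 := by
        intro he; exact h2 (by rw [pvMod10, pvMod10, he])
      symm
      rw [decide_eq_false_iff_not]
      rw [pvCanonN_pos na hna, pvCanonN_pos nb hnb]
      simp [hmod]
  · rw [dif_neg h]
    rw [Bool.eq_iff_iff]
    simp only [beq_iff_eq, decide_eq_true_eq]
    have : na = 0 ∨ nb = 0 := by omega
    rcases this with h0 | h0 <;> subst h0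
    · by_cases hb0 : nb = 0
      · subst hb0; simp
      · rw [pvCanonN_zero, pvCanonN_pos nb (by omega)]
        constructor
        · intro hx
          exact absurd (show nb = 0 by exact_mod_cast hx.symm) hb0
        · intro hx
          exact absurd hx (by simp)
    · by_cases ha0 : na = 0
      · subst ha0; simp
      · rw [pvCanonN_zero, pvCanonN_pos na (by omega)]
        constructor
        · intro hx
          exact absurd (show na = 0 by exact_mod_cast hx) ha0
        · intro hx
          exact absurd hx (by simp)
termination_by a.toNat + b.toNat
decreasing_by
  have h1 := pvStripA_lt _ h.1
  have h2' := pvStripA_lt _ h.2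
  rw [← h2] at h2'
  have n1 := (pvStripA_bounds (PySem.Int.mod (na : Int) 10) (na : Int) (le_of_lt h.1)).1
  have n2 := (pvStripA_bounds (PySem.Int.mod (na : Int) 10) (nb : Int) (le_of_lt h.2)).1
  omega

lemma pvDD_digits (n : Nat) (h : 0 < n) :
    pvDD (Nat.digits 10 n) = (n % 10) :: pvDD (Nat.digits 10 (pvStripN (n % 10) n)) := by
  rw [Nat.digits_def' (by norm_num : 1 < 10) h]
  rw [pvStripN, if_pos ⟨h, rfl⟩]
  by_cases hm : 0 < n / 10
  · have hd := Nat.digits_def' (by norm_num : 1 < 10) hm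
    by_cases he : (n / 10) % 10 = n % 10
    · have hih := pvDD_digits (n / 10) hm
      rw [pvDD, if_pos (by rw [hd]; simp [he]), hih, he]
    · rw [pvDD, if_neg (by rw [hd]; simp [he]), pvStripN, if_neg (by omega)]
  · have hm0 : n / 10 = 0 := by omega
    rw [pvStripN, if_neg (by omega)]
    rw [hm0]
    simp [pvDD]
termination_by n
decreasing_by omega

lemma pvCanonN_eq (n : Nat) : pvCanonN n = pvDD (Nat.digits 10 n) := by
  rw [pvCanonN]
  by_cases h : 0 < n
  · rw [dif_pos h, pvDD_digits n h, pvCanonN_eq (pvStripN (n % 10) n)]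
  · rw [dif_neg h]
    have : n = 0 := by omega
    subst this
    simp [pvDD]
termination_by n
decreasing_by exact pvStripN_lt n h

-- B's foldl is pvScan
lemma foldl_eq_pvScan (xs : List Char) (out : List Char) :
    xs.foldl (fun out ch => if out.getLast? ≠ some ch then out ++ [ch] else out) out
      = out ++ pvScan out.getLast? xs := by
  induction xs generalizing out with
  | nil => simp [pvScan]
  | cons c t ih =>
    simp only [List.foldl_cons]
    by_cases hc : out.getLast? = some c
    · rw [if_neg (by simpa using hc), ih, pvScan, if_pos hc]
    · rw [if_pos (by simpa using hc), ih, List.getLast?_concat, pvScan, if_neg hc]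
      simp

lemma pvScan_append (p : Option Char) (m : List Char) (c : Char) :
    pvScan p (m ++ [c]) =
      if (m.getLast?.or p) = some c then pvScan p m else pvScan p m ++ [c] := by
  induction m generalizing p with
  | nil => by_cases hp : p = some c <;> simp [pvScan, hp]
  | cons a t ih =>
    have hlast : (a :: t).getLast?.or p = t.getLast?.or (some a) := by
      cases ht : t.getLast? <;> simp [List.getLast?_cons, ht]
    rw [hlast]
    by_cases hp : p = some a
    · rw [List.cons_append, pvScan, if_pos hp, ih, pvScan, if_pos hp, hp]
    · rw [List.cons_append, pvScan, if_neg hp, ih, pvScan, if_neg hp]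
      split_ifs <;> simp

lemma digitChar_inj : ∀ x < 10, ∀ y < 10, Nat.digitChar x = Nat.digitChar y → x = y := by decide

lemma pvScan_reverse_map (l : List Nat) (hl : ∀ x ∈ l, x < 10) :
    pvScan none ((l.map Nat.digitChar).reverse) = ((pvDD l).map Nat.digitChar).reverse := by
  induction l with
  | nil => simp [pvScan, pvDD]
  | cons x t ih =>
    simp only [List.map_cons, List.reverse_cons]
    rw [pvScan_append, ih (fun y hy => hl y (List.mem_cons_of_mem x hy))]
    have hcond : ((t.map Nat.digitChar).reverse.getLast?.or none = some (Nat.digitChar x))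
        ↔ t.head? = some x := by
      rw [List.getLast?_reverse, List.head?_map, Option.or_none]
      cases t with
      | nil => simp
      | cons y s =>
        simp only [List.head?_cons, Option.map_some, Option.some.injEq]
        constructor
        · intro he
          exact digitChar_inj y (hl y (by simp)) x (hl x (by simp)) he
        · intro he; rw [he]
    rw [pvDD]
    by_cases hh : t.head? = some x
    · rw [if_pos (hcond.mpr hh), if_pos hh]
    · rw [if_neg (fun hq => hh (hcond.mp hq)), if_neg hh]
      simp

lemma toDigitsCore_eq (f n : Nat) (acc : List Char) (h : 0 < n) (hf : n < 10 ^ f) :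
    Nat.toDigitsCore 10 f n acc = ((Nat.digits 10 n).map Nat.digitChar).reverse ++ acc := by
  induction f generalizing n acc with
  | zero => rw [pow_zero] at hf; omega
  | succ f ih =>
    rw [Nat.toDigitsCore]
    rw [Nat.digits_def' (by norm_num : 1 < 10) h]
    by_cases h0 : n / 10 = 0
    · rw [if_pos h0, h0]
      simp
    · rw [if_neg h0, ih (n / 10) _ (by omega) (by rw [pow_succ] at hf; omega)]
      simp

lemma pvCollapseB_eq (a : Int) (h : 0 < a) :
    pvCollapseB a = ((pvDD (Nat.digits 10 a.toNat)).map Nat.digitChar).reverse := by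
  unfold pvCollapseB
  rw [PySem.Int.toList_toStr]
  unfold PySem.Int.toChars
  rw [if_neg (by omega)]
  unfold Nat.toDigits
  rw [toDigitsCore_eq _ _ _ (by omega)
    (lt_of_lt_of_le (Nat.lt_pow_self (by norm_num)) (Nat.pow_le_pow_right (by norm_num) (by omega)))]
  rw [List.append_nil, foldl_eq_pvScan, List.nil_append]
  exact pvScan_reverse_map _ (fun x hx => Nat.digits_lt_base (by norm_num) hx)

lemma pvDD_subset (l : List Nat) : ∀ x ∈ pvDD l, x ∈ l := by
  induction l with
  | nil => simp [pvDD]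
  | cons a t ih =>
    intro x hx
    rw [pvDD] at hx
    split_ifs at hx with hc
    · exact List.mem_cons_of_mem a (ih x hx)
    · rcases List.mem_cons.mp hx with hx | hx
      · simp [hx]
      · exact List.mem_cons_of_mem a (ih x hx)

lemma map_digitChar_inj (l1 : List Nat) : ∀ (l2 : List Nat), (∀ x ∈ l1, x < 10) →
    (∀ x ∈ l2, x < 10) → l1.map Nat.digitChar = l2.map Nat.digitChar → l1 = l2 := by
  induction l1 with
  | nil => intro l2 _ _ h; cases l2 <;> simp_all
  | cons a t ih =>
    intro l2 h1 h2 h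
    cases l2 with
    | nil => simp_all
    | cons b s =>
      simp only [List.map_cons, List.cons.injEq] at h
      have hab := digitChar_inj a (h1 a (by simp)) b (h2 b (by simp)) h.1
      rw [hab, ih s (fun x hx => h1 x (List.mem_cons_of_mem a hx))
        (fun x hx => h2 x (List.mem_cons_of_mem b hx)) h.2]

-- ===== VERDICT (by name: the statement is the Claim_ definition above) =====
theorem same_digits_spec : Claim_equal_same_digits := by
  intro a b _ hpre
  unfold Spec_same_digits same_digits same_digits_alt
  rw [pvLoopA_eq a b (le_of_lt hpre.1) (le_of_lt hpre.2),
    pvCollapseB_eq a hpre.1, pvCollapseB_eq b hpre.2,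
    pvCanonN_eq, pvCanonN_eq]
  rw [Bool.eq_iff_iff]
  simp only [decide_eq_true_eq, beq_iff_eq, List.reverse_inj]
  constructor
  · intro he; rw [he]
  · intro he
    exact map_digitChar_inj _ _
      (fun x hx => Nat.digits_lt_base (by norm_num) (pvDD_subset _ x hx))
      (fun x hx => Nat.digits_lt_base (by norm_num) (pvDD_subset _ x hx)) he
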